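-- pv_equiv track=rewrite | github.com/mjenrungrot/autolab | tests/test_guardrails.py | _simulate_streak
-- ===== SOURCE A (Python) =====
-- def _simulate_streak(
--     decisions: list[str],
--     max_same: int = 3,
-- ) -> tuple[bool, int]:
--     """Replay a sequence of decisions and return (breached, final_streak).
--
--     Mirrors the counter logic from _run_once_standard's decide_repeat
--     section.
--     """
--     same_decision_streak = 0
--     last_decision = ""
--     breached = False
--     for decision in decisions:
--         if decision == last_decision:
--             same_decision_streak += 1
--         else:
--             same_decision_streak = 1
--         if same_decision_streak > max_same:
--             breached = True
--             break
--         last_decision = decision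
--     return (breached, same_decision_streak)
-- ===== SOURCE B (Python) =====
-- def _simulate_streak(
--     decisions: list[str],
--     max_same: int = 3,
-- ) -> tuple[bool, int]:
--     """Two phases: compute per-position streak lengths, then report the first breach."""
--     if decisions:
--         streaks = [1]
--         for prev, d in zip(decisions, decisions[1:]):
--             streaks.append(streaks[-1] + 1 if d == prev else 1)
--     else:
--         streaks = []
--     for s in streaks:
--         if s > max_same:
--             return (True, s)
--     return (False, streaks[-1] if streaks else 0)
-- ===== Notes on version B (the rewrite author's own statement) =====
-- stated objective: alternative
-- what changed: Replaces A's last_decision/streak counter state machine with a two-phase pass: first materialise the per-position streak lengths by zipping the list with its own tail, then scan that list for the first value exceeding max_same.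
import Mathlib
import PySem

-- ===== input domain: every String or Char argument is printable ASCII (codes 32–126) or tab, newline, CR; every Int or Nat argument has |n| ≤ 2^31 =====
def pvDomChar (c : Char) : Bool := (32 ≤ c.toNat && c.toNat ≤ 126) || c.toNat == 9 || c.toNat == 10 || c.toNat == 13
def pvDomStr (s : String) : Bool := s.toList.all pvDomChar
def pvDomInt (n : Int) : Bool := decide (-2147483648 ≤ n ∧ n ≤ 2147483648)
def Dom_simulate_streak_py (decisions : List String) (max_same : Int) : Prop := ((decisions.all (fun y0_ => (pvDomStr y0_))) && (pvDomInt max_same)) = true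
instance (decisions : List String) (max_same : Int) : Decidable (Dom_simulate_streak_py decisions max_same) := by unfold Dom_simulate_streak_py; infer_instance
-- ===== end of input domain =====

-- B replaces A's last_decision/streak counter state machine by a two-phase pass (per-position streak list, then first-breach scan); alternative decomposition, same cost.


-- ===== PORT A =====
-- A's loop: state (streak, last), break on breach.
def simStreakGoA (max_same : Int) : List String → Int → String → Bool × Int
  | [], streak, _ => (false, streak)
  | d :: rest, streak, last =>
    let s := if d == last then streak + 1 else 1
    if s > max_same then (true, s) else simStreakGoA max_same rest s d

def simulate_streak_py (decisions : List String) (max_same : Int) : Bool × Int :=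
  simStreakGoA max_same decisions 0 ""

-- ===== PORT B =====
-- Source B's first loop: 'for prev, d in zip(decisions, decisions[1:]): streaks.append(streaks[-1] + 1 if d == prev else 1)'
def altStreaksGo : List (String × String) → List Int → List Int
  | [], streaks => streaks
  | (prev, d) :: rest, streaks =>
    altStreaksGo rest
      (streaks ++ [if d == prev then (PySem.List.pyGet? streaks (-1)).getD 0 + 1 else 1])

-- 'streaks = [1]; <loop>' if decisions is nonempty, else 'streaks = []'
def altStreaks (decisions : List String) : List Int :=
  match decisions with
  | [] => []
  | _ :: _ => altStreaksGo (decisions.zip (PySem.List.slice decisions (some 1) none)) [1]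

-- Source B's second loop: first streak value exceeding max_same
def altFind : List Int → Int → Option Int
  | [], _ => none
  | s :: rest, max_same => if s > max_same then some s else altFind rest max_same

def simulate_streak_py_alt (decisions : List String) (max_same : Int) : Bool × Int :=
  let streaks := altStreaks decisions
  match altFind streaks max_same with
  | some s => (true, s)
  | none => (false, if streaks.isEmpty then 0 else (PySem.List.pyGet? streaks (-1)).getD 0)

-- ===== PRECONDITION & SPEC =====
def Spec_simulate_streak_py (decisions : List String) (max_same : Int) (out : Bool × Int) : Prop := out = simulate_streak_py_alt decisions max_same
instance (decisions : List String) (max_same : Int) (out : Bool × Int) : Decidable (Spec_simulate_streak_py decisions max_same out) := by unfold Spec_simulate_streak_py; infer_instance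

-- ===== CLAIM (what is proved, stated in full; the proofs are below) =====
def Claim_equal_simulate_streak_py : Prop := ∀ (decisions : List String) (max_same : Int), Dom_simulate_streak_py decisions max_same → Spec_simulate_streak_py decisions max_same (simulate_streak_py decisions max_same)

-- ===== LEMMAS AND PROOFS =====

-- a nonempty list's getLast? is some, so the default of getD is irrelevant
theorem getD_last_cons (a : Int) (t : List Int) (x y : Int) :
    (a :: t).getLast?.getD x = (a :: t).getLast?.getD y := by
  cases h : (a :: t).getLast? with
  | none => simp at h
  | some v => rfl

-- clean recursive form of the streak values produced for the zipped tail, given the current streak s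
def niceGo : List (String × String) → Int → List Int
  | [], _ => []
  | (prev, d) :: rest, s =>
    let s' := if d == prev then s + 1 else 1
    s' :: niceGo rest s'

theorem altStreaksGo_eq (ps : List (String × String)) :
    ∀ (acc : List Int) (s : Int), acc.getLast? = some s →
      altStreaksGo ps acc = acc ++ niceGo ps s := by
  induction ps with
  | nil => intro acc s _; simp [altStreaksGo, niceGo]
  | cons p rest ih =>
    intro acc s hlast
    obtain ⟨prev, d⟩ := p
    have hget : PySem.List.pyGet? acc (-1) = some s := by
      rw [PySem.List.pyGet?_neg_one, hlast]
    simp only [altStreaksGo, niceGo, hget, Option.getD_some]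
    set s' : Int := if d == prev then s + 1 else 1 with hs'
    have : (acc ++ [s']).getLast? = some s' := by simp
    rw [ih (acc ++ [s']) s' this]
    simp

-- A's loop from state (s, prev), with s already checked (s ≤ max_same), equals B's
-- judgment of the remaining streak values
theorem simStreakGo_eq (ms : Int) (rest : List String) :
    ∀ (prev : String) (s : Int), s ≤ ms →
      simStreakGoA ms rest s prev =
        (match altFind (niceGo ((prev :: rest).zip rest) s) ms with
         | some v => (true, v)
         | none => (false, (niceGo ((prev :: rest).zip rest) s).getLast?.getD s)) := by
  induction rest with
  | nil => intro prev s _; simp [simStreakGoA, niceGo, altFind]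
  | cons d rest ih =>
    intro prev s hs
    simp only [List.zip_cons_cons, niceGo, simStreakGoA, altFind]
    set s' : Int := if d == prev then s + 1 else 1 with hs'
    by_cases hb : s' > ms
    · simp [hb]
    · rw [if_neg hb, if_neg hb, ih d s' (by omega)]
      cases hf : altFind (niceGo ((d :: rest).zip rest) s') ms with
      | some v => simp [hf]
      | none =>
        simp only [hf]
        cases hn : niceGo ((d :: rest).zip rest) s' with
        | nil => simp [hn]
        | cons a t => simp [hn, List.getLast?_cons_cons, getD_last_cons a t s' s]

theorem simulate_streak_eq (decisions : List String) (ms : Int) :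
    simulate_streak_py decisions ms = simulate_streak_py_alt decisions ms := by
  cases decisions with
  | nil =>
    simp [simulate_streak_py, simulate_streak_py_alt, simStreakGoA, altStreaks, altFind]
  | cons d rest =>
    have hstreaks : altStreaks (d :: rest) = 1 :: niceGo ((d :: rest).zip rest) 1 := by
      simp only [altStreaks, PySem.List.slice_from_one, List.tail_cons]
      have h1 : ([1] : List Int).getLast? = some 1 := by simp
      rw [altStreaksGo_eq _ [1] 1 h1]
      simp
    have hfirst : (if (d == "") = true then (0 : Int) + 1 else 1) = 1 := by
      split <;> ring
    simp only [simulate_streak_py, simulate_streak_py_alt, simStreakGoA, hstreaks, hfirst]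
    by_cases hb : (1 : Int) > ms
    · simp [altFind, hb]
    · rw [if_neg hb, simStreakGo_eq ms rest d 1 (by omega)]
      simp only [altFind, if_neg hb]
      cases hf : altFind (niceGo ((d :: rest).zip rest) 1) ms with
      | some v => simp [hf]
      | none =>
        simp only [hf]
        cases hn : niceGo ((d :: rest).zip rest) 1 with
        | nil => simp [hn, PySem.List.pyGet?_neg_one]
        | cons a t =>
          simp [hn, PySem.List.pyGet?_neg_one, List.getLast?_cons_cons, getD_last_cons a t 1 0]

-- ===== VERDICT (by name: the statement is the Claim_ definition above) =====
theorem simulate_streak_py_spec : Claim_equal_simulate_streak_py := by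
  intro decisions ms _
  exact simulate_streak_eq decisions ms
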